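-- pv_equiv track=rewrite | github.com/claracenn/FinLite-ExcelAddIn | backend/app/run_server.py | _group_records_by_session
-- ===== SOURCE A (Python) =====
-- from typing import Dict, List, Optional, Tuple
--
-- def _group_records_by_session(records: List[Dict]) -> Dict[str, List[Tuple[int, Dict]]]:
--     grouped: Dict[str, List[Tuple[int, Dict]]] = {}
--     for idx, rec in records:
--         sid = str(rec.get("session_id") or "")
--         if not sid:
--             continue
--         grouped.setdefault(sid, []).append((idx, rec))
--     return grouped
-- ===== SOURCE B (Python) =====
-- from typing import Dict, List, Tuple
--
-- def _group_records_by_session(records: List[Dict]) -> Dict[str, List[Tuple[int, Dict]]]: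
--     # Two-pass: normalize every sid once, dedup the non-empty sids in first-occurrence
--     # order, then build each group by one filter pass per session.
--     keyed = [(str(rec.get("session_id") or ""), (idx, rec)) for idx, rec in records]
--     order = dict.fromkeys(sid for sid, _ in keyed if sid)
--     return {sid: [item for s, item in keyed if s == sid] for sid in order}
-- ===== Notes on version B (the rewrite author's own statement) =====
-- stated objective: alternative
-- what changed: Replaces A's incremental setdefault-append dict building with a two-pass scheme: normalize all session ids once, deduplicate the non-empty ids in first-occurrence order, then build each group by a per-session filter pass.
import Mathlib
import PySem

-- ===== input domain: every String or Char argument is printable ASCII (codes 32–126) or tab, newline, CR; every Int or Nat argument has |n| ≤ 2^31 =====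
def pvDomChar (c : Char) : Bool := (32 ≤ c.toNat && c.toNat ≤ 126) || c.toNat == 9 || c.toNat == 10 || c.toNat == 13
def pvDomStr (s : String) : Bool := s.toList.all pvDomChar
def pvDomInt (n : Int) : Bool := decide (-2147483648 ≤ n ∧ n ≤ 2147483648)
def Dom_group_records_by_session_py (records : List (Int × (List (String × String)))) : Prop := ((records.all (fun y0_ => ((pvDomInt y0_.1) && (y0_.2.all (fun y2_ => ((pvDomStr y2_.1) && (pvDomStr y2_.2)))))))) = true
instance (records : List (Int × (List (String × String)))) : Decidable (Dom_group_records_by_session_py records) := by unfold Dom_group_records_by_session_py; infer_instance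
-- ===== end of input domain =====

-- B replaces A's incremental setdefault-append dict building with a two-pass scheme
-- (normalize ids once, dedup them in first-occurrence order, one filter pass per session);
-- objective: alternative decomposition, no speed claim.

-- ===== PORT A =====
-- grouped.setdefault(sid, []).append((idx, rec))  ≡  grouped[sid] = grouped.get(sid, []) + [(idx, rec)]  =  Dict.modify
def group_records_by_session_py (records : List (Int × (List (String × String)))) : List (String × List (Int × (List (String × String)))) :=
  (records.foldl
    (fun grouped r =>
      let sid := (PySem.Dict.ofList r.2).getD "session_id" ""
      if sid = "" then grouped
      else grouped.modify sid [] (fun l => l ++ [r]))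
    PySem.Dict.empty).items

-- ===== PORT B =====
def group_records_by_session_py_alt (records : List (Int × (List (String × String)))) : List (String × List (Int × (List (String × String)))) :=
  let keyed := records.map (fun r => ((PySem.Dict.ofList r.2).getD "session_id" "", r))
  let order := PySem.List.dedup ((keyed.map Prod.fst).filter (fun s => !(s == "")))
  order.map (fun sid => (sid, (keyed.filter (fun p => p.1 == sid)).map Prod.snd))

-- ===== PRECONDITION & SPEC =====
def Spec_group_records_by_session_py (records : List (Int × (List (String × String)))) (out : List (String × List (Int × (List (String × String))))) : Prop := out = group_records_by_session_py_alt records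
instance (records : List (Int × (List (String × String)))) (out : List (String × List (Int × (List (String × String))))) : Decidable (Spec_group_records_by_session_py records out) := by unfold Spec_group_records_by_session_py; infer_instance

-- ===== CLAIM (what is proved, stated in full; the proofs are below) =====
def Claim_equal_group_records_by_session_py : Prop := ∀ (records : List (Int × (List (String × String)))), Dom_group_records_by_session_py records → Spec_group_records_by_session_py records (group_records_by_session_py records)

-- ===== LEMMAS AND PROOFS =====

-- the normalized session id of one record
def pvKey (r : Int × (List (String × String))) : String :=
  (PySem.Dict.ofList r.2).getD "session_id" ""

-- A's loop skips records with empty sid: it equals the pure modify-loop over the filtered list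
theorem pv_foldl_skip (l : List (Int × (List (String × String))))
    (d : PySem.Dict String (List (Int × (List (String × String))))) :
    l.foldl
      (fun grouped r =>
        let sid := (PySem.Dict.ofList r.2).getD "session_id" ""
        if sid = "" then grouped
        else grouped.modify sid [] (fun l => l ++ [r])) d
    = (l.filter (fun r => !((PySem.Dict.ofList r.2).getD "session_id" "" == ""))).foldl
        (fun grouped r =>
          grouped.modify ((PySem.Dict.ofList r.2).getD "session_id" "") [] (fun l => l ++ [r])) d := by
  induction l generalizing d with
  | nil => rfl
  | cons a t ih =>
    simp only [List.foldl_cons, List.filter_cons]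
    by_cases h : (PySem.Dict.ofList a.2).getD "session_id" "" = ""
    · simp [h, ih]
    · simp [h, ih]

-- a dict with unique keys is its key list paired with its lookups
theorem pv_items_eq_keys_map {κ ν : Type} [BEq κ] [LawfulBEq κ]
    (d : PySem.Dict κ ν) (h : d.keys.Nodup) (dflt : ν) :
    d.items = d.keys.map (fun k => (k, d.getD k dflt)) := by
  have hk : d.keys = d.items.map (fun p => p.1) := by
    simp only [PySem.Dict.keys]
  rw [hk, List.map_map]
  have : ∀ p ∈ d.items, ((fun k => (k, d.getD k dflt)) ∘ fun p => p.1) p = id p := by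
    intro p hp
    have := PySem.Dict.getD_of_mem_items (d := d) (k := p.1) (v := p.2)
      (by simpa using hp) h (d0 := dflt)
    simp [this]
  rw [List.map_congr_left this, List.map_id]

theorem pv_main (records : List (Int × (List (String × String)))) :
    group_records_by_session_py records = group_records_by_session_py_alt records := by
  unfold group_records_by_session_py group_records_by_session_py_alt
  rw [pv_foldl_skip]
  dsimp only
  have hKey : ∀ r : Int × (List (String × String)),
      (PySem.Dict.ofList r.2).getD "session_id" "" = pvKey r := fun _ => rfl
  simp only [hKey]
  set l' := records.filter (fun r => !(pvKey r == "")) with hl'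
  have hfold : l'.foldl
      (fun grouped r => grouped.modify (pvKey r) [] (fun l => l ++ [r])) PySem.Dict.empty
      = (l'.map (fun r => (pvKey r, r))).foldl
          (fun d p => d.modify p.1 [] (fun l => l ++ [p.2])) PySem.Dict.empty := by
    rw [List.foldl_map]
  rw [hfold]
  set pairs := l'.map (fun r => (pvKey r, r)) with hpairs
  set D := pairs.foldl (fun d p => d.modify p.1 [] (fun l => l ++ [p.2])) PySem.Dict.empty with hD
  have hnodup : D.keys.Nodup := by
    rw [hD]
    exact PySem.Dict.nodup_keys_foldl_modify_key pairs (fun p => p.1) []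
      (fun d p => fun l => l ++ [p.2]) PySem.Dict.empty (by simp [pysem])
  have hkeys : D.keys = PySem.Set.ofList (l'.map pvKey) := by
    rw [hD, PySem.Dict.keys_foldl_modify_key, PySem.Set.ofList_eq_foldl, hpairs,
      List.map_map]
    rfl
  have hgetD : ∀ c, D.getD c [] = (pairs.filter (fun p => p.1 == c)).map (fun p => p.2) := by
    intro c
    rw [hD, PySem.Dict.getD_foldl_modify_append]
    simp [pysem]
  rw [pv_items_eq_keys_map D hnodup [], hkeys]
  -- the two key orders coincide
  have horder : ((records.map (fun r => (pvKey r, r))).map Prod.fst).filter (fun s => !(s == ""))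
      = l'.map pvKey := by
    rw [List.map_map]
    have h1 : (Prod.fst ∘ fun r : Int × (List (String × String)) => (pvKey r, r)) = pvKey := rfl
    rw [h1, hl', List.filter_map]
    rfl
  rw [horder, PySem.List.dedup_eq_ofList]
  -- and for every sid in the order, the two group lists coincide
  apply List.map_congr_left
  intro sid hsid
  have hsid' : sid ≠ "" := by
    have hmem : sid ∈ l'.map pvKey := (PySem.Set.mem_ofList _ _).mp hsid
    rcases List.mem_map.mp hmem with ⟨r, hr, hkr⟩
    rw [hl'] at hr
    have := List.of_mem_filter hr
    simp only [Bool.not_eq_true', beq_eq_false_iff_ne] at this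
    rw [← hkr]; exact this
  have hgrp : (records.map (fun r => (pvKey r, r))).filter (fun p => p.1 == sid)
      = pairs.filter (fun p => p.1 == sid) := by
    rw [hpairs, hl', List.filter_map, List.filter_map, List.filter_filter]
    congr 1
    apply List.filter_congr
    intro r _
    simp only [Function.comp]
    by_cases h : pvKey r = sid
    · simp [h, hsid']
    · simp [h]
  rw [hgetD, hgrp]

-- ===== VERDICT (by name: the statement is the Claim_ definition above) =====
theorem group_records_by_session_py_spec : Claim_equal_group_records_by_session_py := by
  intro records _
  show _ = _
  exact pv_main records
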